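-- pv_equiv track=rewrite | github.com/k-roy/MAGESTIC | generate_amino_acid_variant_guide_donor_oligos_for_saturation_editing.py | assign_aa_num_to_exons
-- ===== SOURCE A (Python) =====
-- def assign_aa_num_to_exons(ORF_strand, ORF_exon_coords, ORF_seq):
--     '''
--     takes the strand and exon coords
--     returns a tuple of tuples [(1,2), (2,3,4,5,6)], where each tuple represents an exon, and the integers inside represent aa_nums in that exon
--     '''
--     current_exon_num = 1
--     aa_num_to_exon = {}
--     aa_length = len(ORF_seq)
--     previous_aa_end_coord = None
--     for aa_num in range(1, aa_length + 1):
--         current_aa_coords = ORF_exon_coords[(aa_num - 1)*3 : aa_num*3 ]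
--         if previous_aa_end_coord != None and abs( current_aa_coords[0] - previous_aa_end_coord ) != 1: ##exon found in between amino acids
--             current_exon_num += 1
--             aa_num_to_exon[aa_num] = [current_exon_num]
--         else:
--             aa_num_to_exon[aa_num] = [current_exon_num]
--         if abs( current_aa_coords[2] - current_aa_coords[0] ) != 2:  ##aa is split across exons
--             aa_num_to_exon[aa_num] = [current_exon_num, current_exon_num + 1]
--             current_exon_num += 1
--         previous_aa_end_coord = current_aa_coords[2]
--     return aa_num_to_exon
-- ===== SOURCE B (Python) =====
-- def assign_aa_num_to_exons(ORF_strand, ORF_exon_coords, ORF_seq):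
--     '''
--     Two-pass re-implementation: first record, per amino acid, whether it starts a
--     new exon and whether it is split across exons; then assign exon numbers by
--     prefix-summing those increments.
--     '''
--     n = len(ORF_seq)
--     starts_new = []
--     split = []
--     prev = None
--     for i in range(n):
--         c = ORF_exon_coords[i * 3 : i * 3 + 3]
--         starts_new.append(prev is not None and abs(c[0] - prev) != 1)
--         split.append(abs(c[2] - c[0]) != 2)
--         prev = c[2]
--     result = {}
--     pre = 0
--     for i in range(n):
--         primary = 1 + pre + starts_new[i]
--         result[i + 1] = [primary, primary + 1] if split[i] else [primary]
--         pre += starts_new[i] + split[i]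
--     return result
-- ===== Notes on version B (the rewrite author's own statement) =====
-- stated objective: alternative
-- what changed: Replaces A's single stateful loop (mutating the running exon counter and dict together) by a two-pass decomposition: a first pass records per amino acid two booleans (starts a new exon / split across exons), a second pass assigns exon numbers by prefix-summing those increments.
import Mathlib
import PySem

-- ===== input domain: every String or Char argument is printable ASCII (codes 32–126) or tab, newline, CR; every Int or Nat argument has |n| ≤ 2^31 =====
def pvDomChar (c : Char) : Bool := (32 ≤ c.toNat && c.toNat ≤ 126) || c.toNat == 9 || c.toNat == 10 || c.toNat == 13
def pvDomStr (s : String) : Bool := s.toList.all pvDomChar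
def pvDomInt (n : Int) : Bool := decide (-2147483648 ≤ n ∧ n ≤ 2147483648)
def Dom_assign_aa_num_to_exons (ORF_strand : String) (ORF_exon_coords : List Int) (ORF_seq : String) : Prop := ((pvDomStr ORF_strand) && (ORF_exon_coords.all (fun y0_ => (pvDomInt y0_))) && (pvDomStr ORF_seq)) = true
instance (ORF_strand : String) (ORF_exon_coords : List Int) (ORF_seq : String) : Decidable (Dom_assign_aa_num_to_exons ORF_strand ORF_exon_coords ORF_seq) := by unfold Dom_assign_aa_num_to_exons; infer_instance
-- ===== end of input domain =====

-- B replaces A's single stateful loop by a two-pass decomposition (record per-aa booleans, then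
-- prefix-sum the exon increments); same O(n) cost, objective: alternative decomposition.

-- ===== PORT A =====
def assign_aa_num_to_exons (ORF_strand : String) (ORF_exon_coords : List Int) (ORF_seq : String) : List (Int × List Int) :=
  let aa_length := PySem.Str.len ORF_seq
  (((PySem.List.pyRange 1 (aa_length + 1)).foldl
      (fun (st : Int × PySem.Dict Int (List Int) × Option Int) (aa_num : Int) =>
        -- current_aa_coords = ORF_exon_coords[(aa_num-1)*3 : aa_num*3]
        let c := PySem.List.slice ORF_exon_coords (some ((aa_num - 1) * 3)) (some (aa_num * 3))
        -- the two indexings c[0], c[2] are in range under Pre_; pyGetD is their total form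
        let (current_exon_num, d) :=
          match st.2.2 with
          | some p =>
            if (PySem.List.pyGetD c 0 0 - p).natAbs ≠ 1 then
              (st.1 + 1, st.2.1.insert aa_num [st.1 + 1])
            else (st.1, st.2.1.insert aa_num [st.1])
          | none => (st.1, st.2.1.insert aa_num [st.1])
        let (current_exon_num, d) :=
          if (PySem.List.pyGetD c 2 0 - PySem.List.pyGetD c 0 0).natAbs ≠ 2 then
            (current_exon_num + 1, d.insert aa_num [current_exon_num, current_exon_num + 1])
          else (current_exon_num, d)
        (current_exon_num, d, some (PySem.List.pyGetD c 2 0)))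
      (1, PySem.Dict.empty, none)).2.1).items

-- ===== PORT B =====
def assign_aa_num_to_exons_alt (ORF_strand : String) (ORF_exon_coords : List Int) (ORF_seq : String) : List (Int × List Int) :=
  let n := PySem.Str.len ORF_seq
  -- pass 1: per amino acid, does it start a new exon / is it split across exons
  let p1 := (PySem.List.pyRange 0 n).foldl
      (fun (st : List Bool × List Bool × Option Int) (i : Int) =>
        let c := PySem.List.slice ORF_exon_coords (some (i * 3)) (some (i * 3 + 3))
        let b1 := match st.2.2 with
          | none => false
          | some p => decide ((PySem.List.pyGetD c 0 0 - p).natAbs ≠ 1)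
        let b2 := decide ((PySem.List.pyGetD c 2 0 - PySem.List.pyGetD c 0 0).natAbs ≠ 2)
        (st.1 ++ [b1], st.2.1 ++ [b2], some (PySem.List.pyGetD c 2 0)))
      ([], [], none)
  let starts_new := p1.1
  let split := p1.2.1
  -- pass 2: prefix-sum the increments into exon numbers
  ((PySem.List.pyRange 0 n).foldl
      (fun (st : PySem.Dict Int (List Int) × Int) (i : Int) =>
        let s : Int := if PySem.List.pyGetD starts_new i false then 1 else 0
        let sp := PySem.List.pyGetD split i false
        let primary := 1 + st.2 + s
        (st.1.insert (i + 1) (if sp then [primary, primary + 1] else [primary]),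
         st.2 + s + (if sp then 1 else 0)))
      (PySem.Dict.empty, 0)).1.items

-- ===== PRECONDITION & SPEC =====
-- Pre_ excludes exactly the inputs where Python A raises IndexError: fewer than 3 exon
-- coordinates per amino acid (the sliced triple is then shorter than 3 and c[2] or c[0] raises).
def Pre_assign_aa_num_to_exons (ORF_strand : String) (ORF_exon_coords : List Int) (ORF_seq : String) : Prop :=
  ORF_seq.toList.length * 3 ≤ ORF_exon_coords.length
instance (ORF_strand : String) (ORF_exon_coords : List Int) (ORF_seq : String) : Decidable (Pre_assign_aa_num_to_exons ORF_strand ORF_exon_coords ORF_seq) := by unfold Pre_assign_aa_num_to_exons; infer_instance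

def pvWitness_assign_aa_num_to_exons : String × List Int × String := ("+", [10, 11, 12, 20, 21, 22], "MK")

def Spec_assign_aa_num_to_exons (ORF_strand : String) (ORF_exon_coords : List Int) (ORF_seq : String) (out : List (Int × List Int)) : Prop := out = assign_aa_num_to_exons_alt ORF_strand ORF_exon_coords ORF_seq
instance (ORF_strand : String) (ORF_exon_coords : List Int) (ORF_seq : String) (out : List (Int × List Int)) : Decidable (Spec_assign_aa_num_to_exons ORF_strand ORF_exon_coords ORF_seq out) := by unfold Spec_assign_aa_num_to_exons; infer_instance

-- ===== CLAIM (what is proved, stated in full; the proofs are below) =====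
def Claim_equal_assign_aa_num_to_exons : Prop := ∀ (ORF_strand : String) (ORF_exon_coords : List Int) (ORF_seq : String), Dom_assign_aa_num_to_exons ORF_strand ORF_exon_coords ORF_seq → Pre_assign_aa_num_to_exons ORF_strand ORF_exon_coords ORF_seq → Spec_assign_aa_num_to_exons ORF_strand ORF_exon_coords ORF_seq (assign_aa_num_to_exons ORF_strand ORF_exon_coords ORF_seq)

-- ===== LEMMAS AND PROOFS =====

-- the sliced coordinate triple of amino acid i (0-based), its endpoints, the two per-aa booleans
-- (starts-new-exon / split-across-exons), their prefix sum, and the resulting dict entries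
def pvTrip (coords : List Int) (i : Nat) : List Int :=
  PySem.List.slice coords (some ((i : Int) * 3)) (some ((i : Int) * 3 + 3))
def pvC0 (coords : List Int) (i : Nat) : Int := PySem.List.pyGetD (pvTrip coords i) 0 0
def pvC2 (coords : List Int) (i : Nat) : Int := PySem.List.pyGetD (pvTrip coords i) 2 0
def pvSn (coords : List Int) : Nat → Bool
  | 0 => false
  | i + 1 => decide ((pvC0 coords (i + 1) - pvC2 coords i).natAbs ≠ 1)
def pvSp (coords : List Int) (i : Nat) : Bool := decide ((pvC2 coords i - pvC0 coords i).natAbs ≠ 2)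
def pvW (coords : List Int) (i : Nat) : Int :=
  (if pvSn coords i then 1 else 0) + (if pvSp coords i then 1 else 0)
def pvS (coords : List Int) : Nat → Int
  | 0 => 0
  | k + 1 => pvS coords k + pvW coords k
def pvEnt (coords : List Int) (i : Nat) : List Int :=
  let p := 1 + pvS coords i + (if pvSn coords i then 1 else 0)
  if pvSp coords i then [p, p + 1] else [p]
def pvSpecList (coords : List Int) (n : Nat) : List (Int × List Int) :=
  (List.range n).map (fun (j : Nat) => ((j : Int) + 1, pvEnt coords j))

lemma pv_fresh_key (coords : List Int) (k : Nat) :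
    (PySem.Dict.mk (pvSpecList coords k) : PySem.Dict Int (List Int)).contains ((k : Int) + 1) = false := by
  rw [PySem.Dict.contains_eq_decide_mem_keys, PySem.Dict.keys_mk]
  simp only [pvSpecList, List.map_map, decide_eq_false_iff_not, List.mem_map, Function.comp]
  rintro ⟨j, hj, h⟩
  simp at h
  have := List.mem_range.mp hj
  omega

lemma pv_A_fold (coords : List Int) (k : Nat) :
    (PySem.List.pyRange 1 ((k : Int) + 1)).foldl
      (fun (st : Int × PySem.Dict Int (List Int) × Option Int) (aa_num : Int) =>
        let c := PySem.List.slice coords (some ((aa_num - 1) * 3)) (some (aa_num * 3))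
        let (current_exon_num, d) :=
          match st.2.2 with
          | some p =>
            if (PySem.List.pyGetD c 0 0 - p).natAbs ≠ 1 then
              (st.1 + 1, st.2.1.insert aa_num [st.1 + 1])
            else (st.1, st.2.1.insert aa_num [st.1])
          | none => (st.1, st.2.1.insert aa_num [st.1])
        let (current_exon_num, d) :=
          if (PySem.List.pyGetD c 2 0 - PySem.List.pyGetD c 0 0).natAbs ≠ 2 then
            (current_exon_num + 1, d.insert aa_num [current_exon_num, current_exon_num + 1])
          else (current_exon_num, d)
        (current_exon_num, d, some (PySem.List.pyGetD c 2 0)))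
      (1, PySem.Dict.empty, none)
    = (1 + pvS coords k, PySem.Dict.mk (pvSpecList coords k),
       match k with | 0 => none | j + 1 => some (pvC2 coords j)) := by
  induction k with
  | zero =>
    show _ = ((1 : Int), PySem.Dict.mk (pvSpecList coords 0), (none : Option Int))
    norm_num [PySem.List.pyRange, pvSpecList, PySem.Dict.empty]
  | succ k ih =>
    have hcast : ((k + 1 : Nat) : Int) + 1 = ((k : Int) + 1) + 1 := by push_cast; ring
    rw [hcast, PySem.List.pyRange_one_succ_right (by omega), List.foldl_append, ih]
    simp only [List.foldl_cons, List.foldl_nil]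
    have h1 : ((k : Int) + 1 - 1) * 3 = (k : Int) * 3 := by ring
    have h2 : ((k : Int) + 1) * 3 = (k : Int) * 3 + 3 := by ring
    rw [h1, h2]
    simp only [show PySem.List.slice coords (some ((k : Int) * 3)) (some ((k : Int) * 3 + 3)) = pvTrip coords k from rfl]
    simp only [show PySem.List.pyGetD (pvTrip coords k) 0 0 = pvC0 coords k from rfl,
               show PySem.List.pyGetD (pvTrip coords k) 2 0 = pvC2 coords k from rfl]
    have hins : ∀ v : List Int, v = pvEnt coords k →
        (PySem.Dict.mk (pvSpecList coords k) : PySem.Dict Int (List Int)).insert ((k : Int) + 1) v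
          = PySem.Dict.mk (pvSpecList coords (k + 1)) := by
      intro v hv
      apply PySem.Dict.ext
      rw [PySem.Dict.items_insert_of_not_contains _ _ (pv_fresh_key coords k)]
      simp [pvSpecList, List.range_succ, hv]
    rcases k with _ | j
    · by_cases hsp : (pvC2 coords 0 - pvC0 coords 0).natAbs ≠ 2
      · simp only [if_pos hsp]
        refine Prod.ext ?_ (Prod.ext ?_ rfl)
        · simp [pvS, pvW, pvSn, pvSp, hsp]
        · rw [PySem.Dict.insert_insert_self]
          exact hins [1 + pvS coords 0, 1 + pvS coords 0 + 1] (by simp [pvEnt, pvSn, pvSp, hsp])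
      · simp only [if_neg hsp]
        refine Prod.ext ?_ (Prod.ext ?_ rfl)
        · simp [pvS, pvW, pvSn, pvSp, hsp]
        · exact hins [1 + pvS coords 0] (by simp [pvEnt, pvSn, pvSp, hsp])
    · by_cases hsn : (pvC0 coords (j + 1) - pvC2 coords j).natAbs ≠ 1 <;>
        by_cases hsp : (pvC2 coords (j + 1) - pvC0 coords (j + 1)).natAbs ≠ 2
      · simp only [if_pos hsn, if_pos hsp]
        refine Prod.ext ?_ (Prod.ext ?_ rfl)
        · simp [pvS, pvW, pvSn, pvSp, hsn, hsp]; ring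
        · rw [PySem.Dict.insert_insert_self]
          exact hins [1 + pvS coords (j + 1) + 1, 1 + pvS coords (j + 1) + 1 + 1]
            (by simp [pvEnt, pvSn, pvSp, hsn, hsp])
      · simp only [if_pos hsn, if_neg hsp]
        refine Prod.ext ?_ (Prod.ext ?_ rfl)
        · simp [pvS, pvW, pvSn, pvSp, hsn, hsp]; ring
        · exact hins [1 + pvS coords (j + 1) + 1] (by simp [pvEnt, pvSn, pvSp, hsn, hsp])
      · simp only [if_neg hsn, if_pos hsp]
        refine Prod.ext ?_ (Prod.ext ?_ rfl)
        · simp [pvS, pvW, pvSn, pvSp, hsn, hsp]; ring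
        · rw [PySem.Dict.insert_insert_self]
          exact hins [1 + pvS coords (j + 1), 1 + pvS coords (j + 1) + 1]
            (by simp [pvEnt, pvSn, pvSp, hsn, hsp])
      · simp only [if_neg hsn, if_neg hsp]
        refine Prod.ext ?_ (Prod.ext ?_ rfl)
        · simp [pvS, pvW, pvSn, pvSp, hsn, hsp]
        · exact hins [1 + pvS coords (j + 1)] (by simp [pvEnt, pvSn, pvSp, hsn, hsp])

lemma pv_insert_ent (coords : List Int) (k : Nat) (v : List Int) (hv : v = pvEnt coords k) :
    (PySem.Dict.mk (pvSpecList coords k) : PySem.Dict Int (List Int)).insert ((k : Int) + 1) v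
      = PySem.Dict.mk (pvSpecList coords (k + 1)) := by
  apply PySem.Dict.ext
  rw [PySem.Dict.items_insert_of_not_contains _ _ (pv_fresh_key coords k)]
  simp [pvSpecList, List.range_succ, hv]

lemma pv_B1_fold (coords : List Int) (k : Nat) :
    (PySem.List.pyRange 0 (k : Int)).foldl
      (fun (st : List Bool × List Bool × Option Int) (i : Int) =>
        let c := PySem.List.slice coords (some (i * 3)) (some (i * 3 + 3))
        let b1 := match st.2.2 with
          | none => false
          | some p => decide ((PySem.List.pyGetD c 0 0 - p).natAbs ≠ 1)
        let b2 := decide ((PySem.List.pyGetD c 2 0 - PySem.List.pyGetD c 0 0).natAbs ≠ 2)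
        (st.1 ++ [b1], st.2.1 ++ [b2], some (PySem.List.pyGetD c 2 0)))
      ([], [], none)
    = ((List.range k).map (pvSn coords), (List.range k).map (pvSp coords),
       match k with | 0 => none | j + 1 => some (pvC2 coords j)) := by
  induction k with
  | zero => norm_num [PySem.List.pyRange]
  | succ k ih =>
    have hcast : ((k + 1 : Nat) : Int) = (k : Int) + 1 := by push_cast; ring
    rw [hcast, PySem.List.pyRange_one_succ_right (by omega), List.foldl_append, ih]
    simp only [List.foldl_cons, List.foldl_nil]
    simp only [show PySem.List.slice coords (some ((k : Int) * 3)) (some ((k : Int) * 3 + 3)) = pvTrip coords k from rfl,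
      show PySem.List.pyGetD (pvTrip coords k) 0 0 = pvC0 coords k from rfl,
      show PySem.List.pyGetD (pvTrip coords k) 2 0 = pvC2 coords k from rfl]
    rcases k with _ | j
    · simp [pvSn, pvSp, List.range_succ]
    · simp [pvSn, pvSp, List.range_succ]

lemma pv_B2_fold (coords : List Int) (n k : Nat) (hk : k ≤ n) :
    (PySem.List.pyRange 0 (k : Int)).foldl
      (fun (st : PySem.Dict Int (List Int) × Int) (i : Int) =>
        let s : Int := if PySem.List.pyGetD ((List.range n).map (pvSn coords)) i false then 1 else 0
        let sp := PySem.List.pyGetD ((List.range n).map (pvSp coords)) i false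
        let primary := 1 + st.2 + s
        (st.1.insert (i + 1) (if sp then [primary, primary + 1] else [primary]),
         st.2 + s + (if sp then 1 else 0)))
      (PySem.Dict.empty, 0)
    = (PySem.Dict.mk (pvSpecList coords k), pvS coords k) := by
  induction k with
  | zero => norm_num [PySem.List.pyRange, pvSpecList, pvS, PySem.Dict.empty]
  | succ k ih =>
    have hcast : ((k + 1 : Nat) : Int) = (k : Int) + 1 := by push_cast; ring
    rw [hcast, PySem.List.pyRange_one_succ_right (by omega), List.foldl_append, ih (by omega)]
    simp only [List.foldl_cons, List.foldl_nil]
    rw [PySem.List.pyGetD_natCast, PySem.List.pyGetD_natCast,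
        PySem.List.getD_map_range _ _ _ _ (by omega), PySem.List.getD_map_range _ _ _ _ (by omega)]
    cases hsn : pvSn coords k <;> cases hsp : pvSp coords k
    · simp only [Bool.false_eq_true, if_false]
      refine Prod.ext ?_ ?_
      · exact pv_insert_ent coords k _ (by simp [pvEnt, hsn, hsp])
      · simp [pvS, pvW, hsn, hsp]
    · simp only [Bool.false_eq_true, if_false, if_true]
      refine Prod.ext ?_ ?_
      · exact pv_insert_ent coords k _ (by simp [pvEnt, hsn, hsp])
      · simp [pvS, pvW, hsn, hsp]
    · simp only [if_true, Bool.false_eq_true, if_false]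
      refine Prod.ext ?_ ?_
      · exact pv_insert_ent coords k _ (by simp [pvEnt, hsn, hsp])
      · simp [pvS, pvW, hsn, hsp]
    · simp only [if_true]
      refine Prod.ext ?_ ?_
      · exact pv_insert_ent coords k _ (by simp [pvEnt, hsn, hsp])
      · simp [pvS, pvW, hsn, hsp]; ring

-- ===== VERDICT (by name: the statement is the Claim_ definition above) =====
theorem assign_aa_num_to_exons_spec : Claim_equal_assign_aa_num_to_exons := by
  intro ORF_strand coords seq _hdom _hpre
  unfold Spec_assign_aa_num_to_exons
  have hn := PySem.Str.len_eq seq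
  unfold assign_aa_num_to_exons assign_aa_num_to_exons_alt
  simp only [hn]
  rw [pv_A_fold coords seq.toList.length, pv_B1_fold coords seq.toList.length]
  simp only []
  rw [pv_B2_fold coords seq.toList.length seq.toList.length le_rfl]
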